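-- pv_equiv track=rewrite | github.com/Ente56298/CO-RA_Ecosistema_Cognitivo_Inclusivo | respaldo_ente56/scripts/generar_metadatos.py | detectar_sensible
-- ===== SOURCE A (Python) =====
-- def detectar_sensible(nombre_archivo):
--     """Detecta si un archivo puede contener información sensible"""
--     sensibles = [
--         "curp", "rfc", "nomina", "sueldo", "banco",
--         "tarjeta", "credencial", "password", "clave",
--         "personal", "privado", "confidencial"
--     ]
--
--     nombre_lower = nombre_archivo.lower()
--     return any(palabra in nombre_lower for palabra in sensibles)
-- ===== SOURCE B (Python) =====
-- _KEYWORDS = ("curp", "rfc", "nomina", "sueldo", "banco",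
--              "tarjeta", "credencial", "password", "clave",
--              "personal", "privado", "confidencial")
--
-- def detectar_sensible(nombre_archivo):
--     """Detecta si un archivo puede contener informacion sensible:
--     single left-to-right scan checking every keyword at each position."""
--     s = nombre_archivo.lower()
--     return any(s.startswith(k, i) for i in range(len(s)) for k in _KEYWORDS)
-- ===== Notes on version B (the rewrite author's own statement) =====
-- stated objective: alternative
-- what changed: Instead of testing each keyword with a separate substring-membership search over the whole name, B makes a single left-to-right scan over the lowered name and at each position checks whether any keyword starts there.
import Mathlib
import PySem

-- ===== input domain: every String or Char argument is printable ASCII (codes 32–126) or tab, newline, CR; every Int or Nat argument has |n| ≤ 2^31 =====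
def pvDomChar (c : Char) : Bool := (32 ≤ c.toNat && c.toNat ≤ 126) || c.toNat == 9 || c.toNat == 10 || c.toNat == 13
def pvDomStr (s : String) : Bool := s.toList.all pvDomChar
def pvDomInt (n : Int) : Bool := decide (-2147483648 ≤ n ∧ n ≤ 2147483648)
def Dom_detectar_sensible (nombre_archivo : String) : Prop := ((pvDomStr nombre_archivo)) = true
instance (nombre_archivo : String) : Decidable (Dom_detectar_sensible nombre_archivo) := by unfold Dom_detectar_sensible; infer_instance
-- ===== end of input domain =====

-- B replaces the per-keyword 'in' substring searches by one left-to-right scan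
-- that checks every keyword at each position (alternative, not claimed faster).

-- ===== PORT A =====
def detectar_sensible (nombre_archivo : String) : Bool :=
  let sensibles : List String :=
    ["curp", "rfc", "nomina", "sueldo", "banco",
     "tarjeta", "credencial", "password", "clave",
     "personal", "privado", "confidencial"]
  let nombre_lower := PySem.Str.lower nombre_archivo
  sensibles.any (fun palabra => PySem.Str.isIn palabra nombre_lower)

-- ===== PORT B =====
def pvKeywords : List String :=
  ["curp", "rfc", "nomina", "sueldo", "banco",
   "tarjeta", "credencial", "password", "clave",
   "personal", "privado", "confidencial"]

-- the generator 'any(s.startswith(k, i) for i in range(len(s)) for k in _KEYWORDS)':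
-- scan the suffixes of s in order, at each one test every keyword as a prefix
def pvScan (ks : List String) : List Char → Bool
  | [] => false
  | c :: rest =>
      ks.any (fun k => PySem.Chars.startswith (c :: rest) k.toList) || pvScan ks rest

def detectar_sensible_alt (nombre_archivo : String) : Bool :=
  pvScan pvKeywords (PySem.Str.lower nombre_archivo).toList

-- ===== PRECONDITION & SPEC =====
def Spec_detectar_sensible (nombre_archivo : String) (out : Bool) : Prop := out = detectar_sensible_alt nombre_archivo
instance (nombre_archivo : String) (out : Bool) : Decidable (Spec_detectar_sensible nombre_archivo out) := by unfold Spec_detectar_sensible; infer_instance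

-- ===== CLAIM (what is proved, stated in full; the proofs are below) =====
def Claim_equal_detectar_sensible : Prop := ∀ (nombre_archivo : String), Dom_detectar_sensible nombre_archivo → Spec_detectar_sensible nombre_archivo (detectar_sensible nombre_archivo)

-- ===== LEMMAS AND PROOFS =====

theorem pvScan_eq_true_iff (ks : List String) (h : ∀ k ∈ ks, k.toList ≠ []) :
    ∀ l : List Char, pvScan ks l = true ↔ ∃ k ∈ ks, k.toList <:+: l := by
  intro l
  induction l with
  | nil =>
      simp only [pvScan, Bool.false_eq_true, false_iff]
      rintro ⟨k, hk, hinf⟩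
      exact h k hk (List.infix_nil.mp hinf)
  | cons c rest ih =>
      simp only [pvScan, Bool.or_eq_true, List.any_eq_true, ih,
        PySem.Chars.startswith_iff]
      constructor
      · rintro (⟨k, hk, hp⟩ | ⟨k, hk, hi⟩)
        · exact ⟨k, hk, hp.isInfix⟩
        · exact ⟨k, hk, hi.trans (List.suffix_cons c rest).isInfix⟩
      · rintro ⟨k, hk, hi⟩
        rcases List.infix_cons_iff.mp hi with hp | hi'
        · exact Or.inl ⟨k, hk, hp⟩
        · exact Or.inr ⟨k, hk, hi'⟩

-- ===== VERDICT (by name: the statement is the Claim_ definition above) =====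
theorem detectar_sensible_spec : Claim_equal_detectar_sensible := by
  intro s _
  unfold Spec_detectar_sensible detectar_sensible detectar_sensible_alt
  rw [Bool.eq_iff_iff]
  rw [pvScan_eq_true_iff pvKeywords (by decide)]
  simp only [List.any_eq_true, PySem.Str.isIn_iff_infix]
  rfl
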